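-- pv_equiv track=rewrite | github.com/knutesten/advent-of-code | 2016/02/solution.py | calculateKeypadNumberPart2
-- ===== SOURCE A (Python) =====
-- directions = {
--     'U': (-1, 0),
--     'R': (0, 1),
--     'D': (1, 0),
--     'L': (0, -1)
-- }
--
-- keypadPart2 = [
--     [None, None, 1, None, None],
--     [None, 2, 3, 4, None],
--     [5, 6, 7, 8, 9],
--     [None, 'A', 'B', 'C', None],
--     [None, None, 'D', None, None]
-- ]
--
-- def calculateKeypadNumberPart2(position, path):
--     if not path:
--         return position
--
--     head, *tail = path
--
--     x = position[0] + directions[head][0]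
--     y = position[1] + directions[head][1]
--
--     tempPos = (x if 0 <= x <= 4 else position[0], y if 0 <= y <= 4 else position[1])
--
--     newPosition = tempPos if keypadPart2[tempPos[0]][tempPos[1]] is not None else position
--
--     return calculateKeypadNumberPart2(newPosition, tail)
-- ===== SOURCE B (Python) =====
-- directions = {
--     'U': (-1, 0),
--     'R': (0, 1),
--     'D': (1, 0),
--     'L': (0, -1)
-- }
--
-- def calculateKeypadNumberPart2(position, path):
--     # Iterative single pass; the diamond |x-2|+|y-2| <= 2 is exactly the set
--     # of non-None cells of the part-2 keypad, so no table lookup is needed.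
--     pos = position
--     for head in path:
--         dx, dy = directions[head]
--         x = pos[0] + dx
--         y = pos[1] + dy
--         if not 0 <= x <= 4:
--             x = pos[0]
--         if not 0 <= y <= 4:
--             y = pos[1]
--         if abs(x - 2) + abs(y - 2) <= 2:
--             pos = (x, y)
--     return pos
-- ===== Notes on version B (the rewrite author's own statement) =====
-- stated objective: simpler
-- what changed: Recursion over the path with a None-table lookup is replaced by a single iterative loop that accepts a move iff the clamped cell lies in the diamond |x-2|+|y-2|<=2, eliminating both the recursion and the keypad table.
-- outside the precondition, e.g. on calculateKeypadNumberPart2((-3, 0), ['R']): A returns (-3, 1), B returns (-3, 0)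
import Mathlib
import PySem

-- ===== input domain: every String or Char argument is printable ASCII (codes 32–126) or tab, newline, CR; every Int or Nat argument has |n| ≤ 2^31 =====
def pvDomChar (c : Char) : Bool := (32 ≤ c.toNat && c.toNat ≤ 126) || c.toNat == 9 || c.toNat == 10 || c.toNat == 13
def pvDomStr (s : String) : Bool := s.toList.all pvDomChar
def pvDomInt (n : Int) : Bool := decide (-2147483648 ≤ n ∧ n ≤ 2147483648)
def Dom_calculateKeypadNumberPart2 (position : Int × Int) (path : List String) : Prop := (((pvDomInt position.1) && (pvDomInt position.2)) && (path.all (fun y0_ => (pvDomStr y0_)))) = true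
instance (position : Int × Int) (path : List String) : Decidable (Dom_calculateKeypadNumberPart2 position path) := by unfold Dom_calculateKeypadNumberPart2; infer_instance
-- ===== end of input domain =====

-- B replaces the recursion-with-table by an iterative fold whose move test is the
-- arithmetic diamond condition |x-2|+|y-2| <= 2 (the exact non-None region of the keypad).
-- ===== PORT A =====
def directionsA : PySem.Dict String (Int × Int) :=
  PySem.Dict.ofList [("U", (-1, 0)), ("R", (0, 1)), ("D", (1, 0)), ("L", (0, -1))]

-- keypadPart2; only "is not None" is ever inspected, so mixed int/str cells are some <str>
def keypadA : List (List (Option String)) :=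
  [[none, none, some "1", none, none],
   [none, some "2", some "3", some "4", none],
   [some "5", some "6", some "7", some "8", some "9"],
   [none, some "A", some "B", some "C", none],
   [none, none, some "D", none, none]]

def calculateKeypadNumberPart2 (position : Int × Int) (path : List String) : Int × Int :=
  match path with
  | [] => position
  | head :: tail =>
    -- directions[head]; KeyError excluded by Pre_
    let d := (PySem.Dict.get? directionsA head).getD (0, 0)
    let x := position.1 + d.1
    let y := position.2 + d.2
    let tempPos : Int × Int :=
      ((if 0 ≤ x ∧ x ≤ 4 then x else position.1), (if 0 ≤ y ∧ y ≤ 4 then y else position.2))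
    -- keypadPart2[tempPos[0]][tempPos[1]]; IndexError excluded by Pre_
    let cell : Option String :=
      ((PySem.List.pyGet? keypadA tempPos.1).bind
        (fun row => PySem.List.pyGet? row tempPos.2)).getD none
    let newPosition := if cell.isSome then tempPos else position
    calculateKeypadNumberPart2 newPosition tail

-- ===== PORT B =====
def stepB (pos : Int × Int) (head : String) : Int × Int :=
  let d := (PySem.Dict.get? directionsA head).getD (0, 0)
  let x0 := pos.1 + d.1
  let y0 := pos.2 + d.2
  let x := if ¬ (0 ≤ x0 ∧ x0 ≤ 4) then pos.1 else x0
  let y := if ¬ (0 ≤ y0 ∧ y0 ≤ 4) then pos.2 else y0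
  if (x - 2).natAbs + (y - 2).natAbs ≤ 2 then (x, y) else pos

def calculateKeypadNumberPart2_alt (position : Int × Int) (path : List String) : Int × Int :=
  path.foldl stepB position

-- ===== PRECONDITION & SPEC =====
-- Pre_ excludes paths containing a non-direction string (A raises KeyError) and nonempty
-- paths starting outside the 5x5 grid, where A's negative-index wraparound is accidental
-- (and far outside the grid A raises IndexError).
def Pre_calculateKeypadNumberPart2 (position : Int × Int) (path : List String) : Prop :=
  (path ≠ [] → 0 ≤ position.1 ∧ position.1 ≤ 4 ∧ 0 ≤ position.2 ∧ position.2 ≤ 4) ∧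
  ∀ s ∈ path, s = "U" ∨ s = "R" ∨ s = "D" ∨ s = "L"
instance (position : Int × Int) (path : List String) : Decidable (Pre_calculateKeypadNumberPart2 position path) := by unfold Pre_calculateKeypadNumberPart2; infer_instance
def pvWitness_calculateKeypadNumberPart2 : (Int × Int) × List String := ((2, 2), ["U", "L", "D", "R"])
def Spec_calculateKeypadNumberPart2 (position : Int × Int) (path : List String) (out : Int × Int) : Prop := out = calculateKeypadNumberPart2_alt position path
instance (position : Int × Int) (path : List String) (out : Int × Int) : Decidable (Spec_calculateKeypadNumberPart2 position path out) := by unfold Spec_calculateKeypadNumberPart2; infer_instance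

-- ===== CLAIM (what is proved, stated in full; the proofs are below) =====
def Claim_equal_calculateKeypadNumberPart2 : Prop := ∀ (position : Int × Int) (path : List String), Dom_calculateKeypadNumberPart2 position path → Pre_calculateKeypadNumberPart2 position path → Spec_calculateKeypadNumberPart2 position path (calculateKeypadNumberPart2 position path)

-- ===== LEMMAS AND PROOFS =====

-- one step of A equals stepB and preserves the grid bounds, for a valid move
theorem step_eq (pos : Int × Int) (head : String)
    (hp : 0 ≤ pos.1 ∧ pos.1 ≤ 4 ∧ 0 ≤ pos.2 ∧ pos.2 ≤ 4)
    (hh : head = "U" ∨ head = "R" ∨ head = "D" ∨ head = "L") :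
    (let d := (PySem.Dict.get? directionsA head).getD (0, 0)
     let x := pos.1 + d.1
     let y := pos.2 + d.2
     let tempPos : Int × Int :=
       ((if 0 ≤ x ∧ x ≤ 4 then x else pos.1), (if 0 ≤ y ∧ y ≤ 4 then y else pos.2))
     let cell : Option String :=
       ((PySem.List.pyGet? keypadA tempPos.1).bind
         (fun row => PySem.List.pyGet? row tempPos.2)).getD none
     if cell.isSome then tempPos else pos) = stepB pos head ∧
    0 ≤ (stepB pos head).1 ∧ (stepB pos head).1 ≤ 4 ∧
    0 ≤ (stepB pos head).2 ∧ (stepB pos head).2 ≤ 4 := by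
  obtain ⟨x, y⟩ := pos
  obtain ⟨h1, h2, h3, h4⟩ := hp
  rcases hh with h | h | h | h <;> subst h <;>
    interval_cases x <;> interval_cases y <;> decide

theorem eq_on_pre (path : List String) (pos : Int × Int)
    (hp : 0 ≤ pos.1 ∧ pos.1 ≤ 4 ∧ 0 ≤ pos.2 ∧ pos.2 ≤ 4)
    (hv : ∀ s ∈ path, s = "U" ∨ s = "R" ∨ s = "D" ∨ s = "L") :
    calculateKeypadNumberPart2 pos path = calculateKeypadNumberPart2_alt pos path := by
  induction path generalizing pos with
  | nil => rfl
  | cons head tail ih =>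
    have hh := hv head (List.mem_cons_self ..)
    have hs := step_eq pos head hp hh
    have key : calculateKeypadNumberPart2 pos (head :: tail)
        = calculateKeypadNumberPart2 (stepB pos head) tail :=
      congrArg (fun p => calculateKeypadNumberPart2 p tail) hs.1
    calc calculateKeypadNumberPart2 pos (head :: tail)
        = calculateKeypadNumberPart2 (stepB pos head) tail := key
      _ = calculateKeypadNumberPart2_alt (stepB pos head) tail :=
          ih (stepB pos head) hs.2 (fun s hs' => hv s (List.mem_cons_of_mem _ hs'))
      _ = calculateKeypadNumberPart2_alt pos (head :: tail) := rfl

-- ===== VERDICT (by name: the statement is the Claim_ definition above) =====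
theorem calculateKeypadNumberPart2_spec : Claim_equal_calculateKeypadNumberPart2 := by
  intro position path _ hpre
  unfold Spec_calculateKeypadNumberPart2
  match path with
  | [] => rfl
  | head :: tail =>
    exact eq_on_pre (head :: tail) position (hpre.1 (by simp)) hpre.2
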